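-- pv_equiv track=rewrite | github.com/openai/transformer-debugger | neuron_explainer/activations/test_attention_utils.py | _simulate_num_activations
-- ===== SOURCE A (Python) =====
-- def _simulate_num_activations(
--     num_sequence_tokens: int, max_num_attended_to_sequence_tokens: int
-- ) -> int:
--     num_activations_per_token = list(range(1, max_num_attended_to_sequence_tokens + 1)) + [
--         max_num_attended_to_sequence_tokens
--         for _ in range(num_sequence_tokens - max_num_attended_to_sequence_tokens)
--     ]
--     num_activations = sum(num_activations_per_token)
--     return num_activations
-- ===== SOURCE B (Python) =====
-- def _simulate_num_activations(
--     num_sequence_tokens: int, max_num_attended_to_sequence_tokens: int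
-- ) -> int:
--     m = max_num_attended_to_sequence_tokens
--     tri = m * (m + 1) // 2 if m > 0 else 0
--     return tri + max(num_sequence_tokens - m, 0) * m
-- ===== Notes on version B (the rewrite author's own statement) =====
-- stated objective: faster
-- what changed: Replaced building an explicit list of per-token counts and summing it by the closed-form arithmetic-series formula m*(m+1)//2 + max(0, n-m)*m.
import Mathlib
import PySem

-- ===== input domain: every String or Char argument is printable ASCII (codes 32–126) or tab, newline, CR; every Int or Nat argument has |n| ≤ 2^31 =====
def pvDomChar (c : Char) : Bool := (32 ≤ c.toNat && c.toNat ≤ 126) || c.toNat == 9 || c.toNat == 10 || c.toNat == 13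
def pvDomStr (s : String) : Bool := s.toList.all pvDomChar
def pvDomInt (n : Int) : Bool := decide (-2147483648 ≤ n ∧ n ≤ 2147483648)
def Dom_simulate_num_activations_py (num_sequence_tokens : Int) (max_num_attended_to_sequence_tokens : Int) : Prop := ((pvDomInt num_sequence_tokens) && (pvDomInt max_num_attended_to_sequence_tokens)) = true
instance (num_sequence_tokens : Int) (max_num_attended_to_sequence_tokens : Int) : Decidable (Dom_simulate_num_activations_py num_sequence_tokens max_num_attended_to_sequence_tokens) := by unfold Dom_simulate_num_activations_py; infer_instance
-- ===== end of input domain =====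

-- ===== PORT A =====
-- B replaces the list-building loop with the closed-form arithmetic-series formula (objective: faster).
def simulate_num_activations_py (num_sequence_tokens : Int) (max_num_attended_to_sequence_tokens : Int) : Int :=
  let num_activations_per_token : List Int :=
    PySem.List.pyRange 1 (max_num_attended_to_sequence_tokens + 1) 1 ++
      (PySem.List.pyRange 0 (num_sequence_tokens - max_num_attended_to_sequence_tokens) 1).map
        (fun _ => max_num_attended_to_sequence_tokens)
  let num_activations := num_activations_per_token.foldl (fun acc x => acc + x) 0
  num_activations

-- ===== PORT B =====
def simulate_num_activations_py_alt (num_sequence_tokens : Int) (max_num_attended_to_sequence_tokens : Int) : Int :=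
  let m := max_num_attended_to_sequence_tokens
  let tri := if m > 0 then PySem.Int.floordiv (m * (m + 1)) 2 else 0
  tri + max (num_sequence_tokens - m) 0 * m

-- ===== PRECONDITION & SPEC =====
def Spec_simulate_num_activations_py (num_sequence_tokens : Int) (max_num_attended_to_sequence_tokens : Int) (out : Int) : Prop := out = simulate_num_activations_py_alt num_sequence_tokens max_num_attended_to_sequence_tokens
instance (num_sequence_tokens : Int) (max_num_attended_to_sequence_tokens : Int) (out : Int) : Decidable (Spec_simulate_num_activations_py num_sequence_tokens max_num_attended_to_sequence_tokens out) := by unfold Spec_simulate_num_activations_py; infer_instance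

-- ===== CLAIM (what is proved, stated in full; the proofs are below) =====
def Claim_equal_simulate_num_activations_py : Prop := ∀ (num_sequence_tokens : Int) (max_num_attended_to_sequence_tokens : Int), Dom_simulate_num_activations_py num_sequence_tokens max_num_attended_to_sequence_tokens → Spec_simulate_num_activations_py num_sequence_tokens max_num_attended_to_sequence_tokens (simulate_num_activations_py num_sequence_tokens max_num_attended_to_sequence_tokens)

-- ===== LEMMAS AND PROOFS =====

-- ===== VERDICT (by name: the statement is the Claim_ definition above) =====
theorem pv_gauss (t : Nat) :
    (List.map (fun k : Nat => (1 : Int) + k) (List.range t)).sum * 2 = t * (t + 1) := by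
  induction t with
  | zero => simp
  | succ t ih =>
    rw [List.range_succ, List.map_append, List.sum_append]
    push_cast
    push_cast at ih
    simp only [List.map_cons, List.map_nil, List.sum_cons, List.sum_nil]
    nlinarith [ih]

theorem pv_sum_const (c : Nat) (m : Int) :
    (List.map (fun _ : Nat => m) (List.range c)).sum = c * m := by
  induction c with
  | zero => simp
  | succ c ih =>
    rw [List.range_succ, List.map_append, List.sum_append, ih]
    simp
    ring

theorem simulate_num_activations_py_spec : Claim_equal_simulate_num_activations_py := by
  intro n m _
  unfold Spec_simulate_num_activations_py simulate_num_activations_py simulate_num_activations_py_alt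
  simp only [PySem.List.pyRange_one, List.foldl_append]
  rw [show (fun (acc x : Int) => acc + x) = (fun acc x => acc + (id x)) from rfl]
  rw [PySem.List.foldl_add, PySem.List.foldl_add]
  simp only [List.map_map, Function.comp_def, id]
  have h1 := pv_gauss (m + 1 - 1).toNat
  have h2 := pv_sum_const (n - m - 0).toNat m
  have hmt : ((m + 1 - 1).toNat : Int) = max m 0 := by omega
  have hc : ((n - m - 0).toNat : Int) = max (n - m) 0 := by omega
  rw [hmt] at h1
  rw [hc] at h2
  by_cases hm : m > 0
  · rw [PySem.Int.floordiv_eq_ediv_of_pos (by omega)]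
    simp only [if_pos hm]
    have hmx : max m 0 = m := by omega
    rw [hmx] at h1
    rw [zero_add, h2]
    omega
  · simp only [if_neg hm]
    have h0 : (m + 1 - 1).toNat = 0 := by omega
    rw [h0] at *
    simp only [List.range_zero, List.map_nil, List.sum_nil, zero_add] at *
    rw [h2]
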